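-- pv_equiv track=rewrite | github.com/ModalityDance/AR-Omni | inference/inference_chat.py | _strip_history_bos_eos
-- ===== SOURCE A (Python) =====
-- from typing import Any, Dict, List, Optional, Sequence, Union
--
-- SPECIAL_TOKENS = {
--     "<boa>": 12821,
--     "<eoa>": 12820,
--     "<bos>": 0,
--     "<eos>": 2,
--     "<eoh>": 12830,
--     "<eom>": 12831,
-- }
--
-- def _strip_history_bos_eos(
--     history_ids: Optional[List[int]],
--     bos_id: int = SPECIAL_TOKENS["<bos>"],
--     eos_id: int = SPECIAL_TOKENS["<eos>"],
-- ) -> List[int]: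
--     if not history_ids:
--         return []
--     left, right = 0, len(history_ids) - 1
--     while left <= right and history_ids[left] in (bos_id, eos_id):
--         left += 1
--     while right >= left and history_ids[right] in (bos_id, eos_id):
--         right -= 1
--     return history_ids[left : right + 1]
-- ===== SOURCE B (Python) =====
-- SPECIAL_TOKENS = {
--     "<boa>": 12821,
--     "<eoa>": 12820,
--     "<bos>": 0,
--     "<eos>": 2,
--     "<eoh>": 12830,
--     "<eom>": 12831,
-- }
--
-- def _strip_history_bos_eos(
--     history_ids,
--     bos_id=SPECIAL_TOKENS["<bos>"],
--     eos_id=SPECIAL_TOKENS["<eos>"],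
-- ):
--     if not history_ids:
--         return []
--     keepers = [i for i, x in enumerate(history_ids) if x not in (bos_id, eos_id)]
--     if not keepers:
--         return []
--     return history_ids[keepers[0] : keepers[-1] + 1]
-- ===== Notes on version B (the rewrite author's own statement) =====
-- stated objective: simpler
-- what changed: B replaces A's two index-walking while loops (advancing left/right pointers over specials) with a single enumerate pass that collects the indices of non-special tokens and one slice from the first to the last such index.
import Mathlib
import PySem

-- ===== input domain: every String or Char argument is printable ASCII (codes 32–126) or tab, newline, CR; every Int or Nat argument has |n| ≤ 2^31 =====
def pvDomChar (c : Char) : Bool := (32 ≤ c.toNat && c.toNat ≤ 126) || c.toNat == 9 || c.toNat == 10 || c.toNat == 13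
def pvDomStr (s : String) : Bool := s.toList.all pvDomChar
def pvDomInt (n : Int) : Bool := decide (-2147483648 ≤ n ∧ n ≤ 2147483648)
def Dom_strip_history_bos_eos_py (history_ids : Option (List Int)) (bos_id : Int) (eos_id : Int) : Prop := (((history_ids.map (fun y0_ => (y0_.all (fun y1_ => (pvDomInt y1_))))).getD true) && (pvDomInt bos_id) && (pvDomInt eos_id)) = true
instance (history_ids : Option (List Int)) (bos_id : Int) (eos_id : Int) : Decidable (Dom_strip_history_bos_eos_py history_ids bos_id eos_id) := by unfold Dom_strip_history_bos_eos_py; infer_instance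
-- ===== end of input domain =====

-- B replaces A's two index-walking while loops with one enumerate pass collecting the indices of
-- non-special tokens and a single slice from the first to the last such index (objective: simpler).

-- ===== PORT A =====
-- left pointer loop: while left <= right and history_ids[left] in (bos_id, eos_id): left += 1
-- (the loop keeps the index in range, so the `.getD false` branch of the IndexError case is unreachable)
def pvALeft (xs : List Int) (b e : Int) (l r : Int) : Int :=
  if h : l ≤ r ∧ ((PySem.List.pyGet? xs l).map (fun v => v == b || v == e)).getD false = true
  then pvALeft xs b e (l + 1) r
  else l
termination_by (r + 1 - l).toNat
decreasing_by omega

-- right pointer loop: while right >= left and history_ids[right] in (bos_id, eos_id): right -= 1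
def pvARight (xs : List Int) (b e : Int) (l r : Int) : Int :=
  if h : r ≥ l ∧ ((PySem.List.pyGet? xs r).map (fun v => v == b || v == e)).getD false = true
  then pvARight xs b e l (r - 1)
  else r
termination_by (r + 1 - l).toNat
decreasing_by omega

def strip_history_bos_eos_py (history_ids : Option (List Int)) (bos_id : Int) (eos_id : Int) : List Int :=
  match history_ids with
  | none => []
  | some xs =>
    if xs.isEmpty then []
    else
      let left := pvALeft xs bos_id eos_id 0 ((xs.length : Int) - 1)
      let right := pvARight xs bos_id eos_id left ((xs.length : Int) - 1)
      PySem.List.slice xs (some left) (some (right + 1))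

-- ===== PORT B =====
-- keepers = [i for i, x in enumerate(history_ids) if x not in (bos_id, eos_id)]
def pvKeepers (xs : List Int) (b e : Int) : List Int :=
  ((PySem.List.enumerate xs 0).filter (fun p => !(p.2 == b || p.2 == e))).map Prod.fst

def strip_history_bos_eos_py_alt (history_ids : Option (List Int)) (bos_id : Int) (eos_id : Int) : List Int :=
  match history_ids with
  | none => []
  | some xs =>
    if xs.isEmpty then []
    else
      match pvKeepers xs bos_id eos_id with
      | [] => []
      | k :: ks => PySem.List.slice xs (some k) (some (ks.getLastD k + 1))

-- ===== PRECONDITION & SPEC =====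
def Spec_strip_history_bos_eos_py (history_ids : Option (List Int)) (bos_id : Int) (eos_id : Int) (out : List Int) : Prop := out = strip_history_bos_eos_py_alt history_ids bos_id eos_id
instance (history_ids : Option (List Int)) (bos_id : Int) (eos_id : Int) (out : List Int) : Decidable (Spec_strip_history_bos_eos_py history_ids bos_id eos_id out) := by unfold Spec_strip_history_bos_eos_py; infer_instance

-- ===== CLAIM (what is proved, stated in full; the proofs are below) =====
def Claim_equal_strip_history_bos_eos_py : Prop := ∀ (history_ids : Option (List Int)) (bos_id : Int) (eos_id : Int), Dom_strip_history_bos_eos_py history_ids bos_id eos_id → Spec_strip_history_bos_eos_py history_ids bos_id eos_id (strip_history_bos_eos_py history_ids bos_id eos_id)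

-- ===== LEMMAS AND PROOFS =====

lemma pvALeft_spec (b e : Int) :
    ∀ (suf pre : List Int),
      pvALeft (pre ++ suf) b e (pre.length : Int) ((pre.length : Int) + (suf.length : Int) - 1)
        = (pre.length : Int) + ((suf.takeWhile (fun x => x == b || x == e)).length : Int) := by
  intro suf
  induction suf with
  | nil =>
    intro pre
    rw [pvALeft, dif_neg]
    · simp
    · intro hcon; simp at hcon
  | cons x t ih =>
    intro pre
    rw [pvALeft]
    have hget : PySem.List.pyGet? (pre ++ x :: t) ((pre.length : Nat) : Int) = some x := by
      simp
    by_cases hx : (x == b || x == e) = true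
    · rw [dif_pos]
      · have h2 := ih (pre ++ [x])
        simp only [List.append_assoc, List.cons_append, List.nil_append, List.length_append,
          List.length_cons, List.length_nil] at h2
        push_cast at h2
        simp only [List.length_cons, List.takeWhile_cons, if_pos hx]
        push_cast
        rw [show ((pre.length : Int) + ((t.length : Int) + 1) - 1)
              = (pre.length : Int) + 1 + (t.length : Int) - 1 from by ring, h2]
        ring
      · exact ⟨by simp, by rw [hget]; simp [hx]⟩
    · rw [dif_neg]
      · rw [List.takeWhile_cons, if_neg hx]; simp
      · rw [hget]; simp [hx]

lemma pvARight_stop (xs : List Int) (b e l r : Int) (h : r < l) : pvARight xs b e l r = r := by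
  rw [pvARight, dif_neg]
  intro hcon; omega

lemma pvARight_take (b e l : Int) (hl : 0 ≤ l) :
    ∀ (k : Nat) (xs ys : List Int) (r : Int), (r + 1 - l).toNat ≤ k → r < (xs.length : Int) →
      pvARight (xs ++ ys) b e l r = pvARight xs b e l r := by
  intro k
  induction k with
  | zero =>
    intro xs ys r hk hr
    have : r < l := by omega
    rw [pvARight_stop _ _ _ _ _ this, pvARight_stop _ _ _ _ _ this]
  | succ k ih =>
    intro xs ys r hk hr
    by_cases hrl : r < l
    · rw [pvARight_stop _ _ _ _ _ hrl, pvARight_stop _ _ _ _ _ hrl]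
    · have hr0 : 0 ≤ r := by omega
      have hget : PySem.List.pyGet? (xs ++ ys) r = PySem.List.pyGet? xs r := by
        rw [show r = ((r.toNat : Nat) : Int) by omega]
        simp only [PySem.List.pyGet?_natCast]
        rw [List.getElem?_append_left (by omega)]
      conv_lhs => rw [pvARight]
      conv_rhs => rw [pvARight]
      rw [hget]
      by_cases hc : r ≥ l ∧ ((PySem.List.pyGet? xs r).map (fun v => v == b || v == e)).getD false = true
      · rw [dif_pos hc, dif_pos hc]
        exact ih xs ys (r - 1) (by omega) (by omega)
      · rw [dif_neg hc, dif_neg hc]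

lemma pvARight_spec (b e l : Int) (hl : 0 ≤ l) :
    ∀ (t w : List Int) (hw : w ≠ []),
      (∀ y ∈ t, (y == b || y == e) = true) →
      ((w.getLast hw == b || w.getLast hw == e) = false) →
      l ≤ (w.length : Int) - 1 →
      pvARight (w ++ t) b e l ((w.length : Int) + (t.length : Int) - 1) = (w.length : Int) - 1 := by
  intro t
  induction t using List.reverseRecOn with
  | nil =>
    intro w hw ht hlast hlw
    have hlen : 0 < w.length := List.length_pos_iff.mpr hw
    have hget : PySem.List.pyGet? w ((w.length : Int) - 1) = some (w.getLast hw) := by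
      rw [show (w.length : Int) - 1 = (((w.length - 1 : Nat) : Nat) : Int) by omega]
      simp only [PySem.List.pyGet?_natCast]
      rw [List.getElem?_eq_getElem (by omega), List.getLast_eq_getElem]
    simp only [List.append_nil, List.length_nil, Nat.cast_zero, add_zero]
    rw [pvARight, dif_neg]
    intro hcon
    rw [hget] at hcon
    simp [hlast] at hcon
  | append_singleton t y ih =>
    intro w hw ht hlast hlw
    have hty : (y == b || y == e) = true := ht y (by simp)
    have htt : ∀ z ∈ t, (z == b || z == e) = true := fun z hz => ht z (by simp [hz])
    have hget : PySem.List.pyGet? (w ++ (t ++ [y])) ((w.length : Int) + (t.length : Int)) = some y := by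
      rw [show (w.length : Int) + (t.length : Int) = (((w.length + t.length : Nat)) : Int) by push_cast; ring]
      simp only [PySem.List.pyGet?_natCast]
      rw [← List.append_assoc]
      rw [List.getElem?_append_right (by simp), List.getElem?_eq_getElem (by simp)]
      simp
    rw [pvARight, dif_pos]
    · rw [show ((w.length : Int) + ((t ++ [y]).length : Int) - 1 - 1)
            = (w.length : Int) + (t.length : Int) - 1 by simp; ring]
      rw [← List.append_assoc]
      rw [pvARight_take b e l hl ((((w.length : Int) + (t.length : Int) - 1) + 1 - l).toNat)
            (w ++ t) [y] _ (le_refl _) (by simp)]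
      exact ih w hw htt hlast hlw
    · constructor
      · simp; omega
      · rw [show ((w.length : Int) + ((t ++ [y]).length : Int) - 1)
              = (w.length : Int) + (t.length : Int) by simp; ring]
        rw [hget]; simp [hty]

lemma keepers_nil_iff (b e : Int) (xs : List Int) (s : Int) :
    (((PySem.List.enumerate xs s).filter (fun p => !(p.2 == b || p.2 == e))).map Prod.fst) = []
      ↔ ∀ x ∈ xs, (x == b || x == e) = true := by
  rw [List.map_eq_nil_iff, List.filter_eq_nil_iff]
  constructor
  · intro h x hx
    obtain ⟨kk, hk, rfl⟩ := List.mem_iff_getElem.mp hx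
    have := h (s + kk, xs[kk]) ((PySem.List.mem_enumerate_iff xs s _).mpr ⟨kk, hk, rfl⟩)
    simp at this ⊢
    tauto
  · intro h p hp
    obtain ⟨kk, hk, rfl⟩ := (PySem.List.mem_enumerate_iff xs s p).mp hp
    have := h _ (List.getElem_mem hk)
    simp at this ⊢
    tauto

lemma keepers_head (b e : Int) :
    ∀ (xs : List Int) (s k : Int) (ks : List Int),
      (((PySem.List.enumerate xs s).filter (fun p => !(p.2 == b || p.2 == e))).map Prod.fst) = k :: ks →
      k = s + ((xs.takeWhile (fun x => x == b || x == e)).length : Int) := by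
  intro xs
  induction xs with
  | nil => intro s k ks h; simp [PySem.List.enumerate_nil] at h
  | cons x t ih =>
    intro s k ks h
    rw [PySem.List.enumerate_cons] at h
    by_cases hx : (x == b || x == e) = true
    · rw [List.filter_cons_of_neg (by simp [hx])] at h
      have := ih (s + 1) k ks h
      rw [List.takeWhile_cons, if_pos hx]
      simp only [List.length_cons] at this ⊢
      push_cast at this ⊢
      omega
    · rw [List.filter_cons_of_pos (by simp [hx])] at h
      simp at h
      rw [List.takeWhile_cons, if_neg hx]
      simp [h.1]

lemma keepers_last (b e s : Int) :
    ∀ (xs : List Int) (k : Int) (ks : List Int),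
      (((PySem.List.enumerate xs s).filter (fun p => !(p.2 == b || p.2 == e))).map Prod.fst) = k :: ks →
      ks.getLastD k = s + ((xs.rdropWhile (fun x => x == b || x == e)).length : Int) - 1 := by
  intro xs
  induction xs using List.reverseRecOn with
  | nil => intro k ks h; simp [PySem.List.enumerate_nil] at h
  | append_singleton t y ih =>
    intro k ks h
    rw [PySem.List.enumerate_append, List.filter_append, List.map_append] at h
    by_cases hy : (y == b || y == e) = true
    · have hy' : y = b ∨ y = e := by simpa using hy
      have h2 : (((PySem.List.enumerate [y] (s + (t.length : Int))).filter
          (fun p => !(p.2 == b || p.2 == e))).map Prod.fst) = [] := by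
        rcases hy' with h' | h' <;>
          simp [PySem.List.enumerate_cons, PySem.List.enumerate_nil, h']
      rw [h2, List.append_nil] at h
      rw [ih k ks h, List.rdropWhile_concat_pos (fun x => x == b || x == e) t y hy]
    · have hy' : ¬ y = b ∧ ¬ y = e := by simpa using hy
      have h2 : (((PySem.List.enumerate [y] (s + (t.length : Int))).filter
          (fun p => !(p.2 == b || p.2 == e))).map Prod.fst) = [s + (t.length : Int)] := by
        simp [PySem.List.enumerate_cons, PySem.List.enumerate_nil, hy'.1, hy'.2]
      rw [h2] at h
      rw [List.rdropWhile_concat_neg (fun x => x == b || x == e) t y (by simp [hy'.1, hy'.2])]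
      have hv : (k :: ks).getLast? = some (s + (t.length : Int)) := by
        rw [← h]; exact List.getLast?_concat
      rw [List.getLast?_cons] at hv
      have hvv : ks.getLastD k = s + (t.length : Int) := by
        rw [List.getLastD_eq_getLast?]
        exact Option.some.inj hv
      rw [hvv]
      simp
      ring

lemma takeWhile_length_le (b e : Int) :
    ∀ (xs : List Int) (i : Nat) (h : i < xs.length), (xs[i] == b || xs[i] == e) = false →
      (xs.takeWhile (fun x => x == b || x == e)).length ≤ i := by
  intro xs
  induction xs with
  | nil => intro i h; simp at h
  | cons x t ih =>
    intro i h hi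
    match i with
    | 0 =>
      simp only [List.getElem_cons_zero] at hi
      rw [List.takeWhile_cons, if_neg (by simp [hi])]
      simp
    | Nat.succ j =>
      rw [List.takeWhile_cons]
      by_cases hx : (x == b || x == e) = true
      · rw [if_pos hx]
        simpa using Nat.succ_le_succ (ih j (by simpa using h) (by simpa using hi))
      · rw [if_neg hx]; simp

-- ===== VERDICT (by name: the statement is the Claim_ definition above) =====
theorem strip_history_bos_eos_py_spec : Claim_equal_strip_history_bos_eos_py := by
  intro history_ids b e _hdom
  unfold Spec_strip_history_bos_eos_py
  match history_ids with
  | none => rfl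
  | some xs =>
    show (if xs.isEmpty = true then []
        else PySem.List.slice xs (some (pvALeft xs b e 0 ((xs.length : Int) - 1)))
          (some (pvARight xs b e (pvALeft xs b e 0 ((xs.length : Int) - 1)) ((xs.length : Int) - 1) + 1)))
      = (if xs.isEmpty = true then []
        else match pvKeepers xs b e with
          | [] => []
          | k :: ks => PySem.List.slice xs (some k) (some (ks.getLastD k + 1)))
    by_cases hemp : xs.isEmpty = true
    · rw [if_pos hemp, if_pos hemp]
    · rw [if_neg hemp, if_neg hemp]
      have hL : pvALeft xs b e 0 ((xs.length : Int) - 1)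
          = ((xs.takeWhile (fun x => x == b || x == e)).length : Int) := by
        have := pvALeft_spec b e xs []
        simpa using this
      rw [hL]
      by_cases hall : ∀ x ∈ xs, (x == b || x == e) = true
      · -- every token is special: both sides are []
        have hkeep : pvKeepers xs b e = [] := by
          unfold pvKeepers
          exact (keepers_nil_iff b e xs 0).mpr hall
        rw [hkeep]
        have htw : xs.takeWhile (fun x => x == b || x == e) = xs :=
          List.takeWhile_eq_self_iff.mpr hall
        rw [htw]
        have hR : pvARight xs b e ((xs.length : Int)) ((xs.length : Int) - 1)
            = (xs.length : Int) - 1 := pvARight_stop xs b e _ _ (by omega)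
        rw [hR, show ((xs.length : Int) - 1 + 1) = ((xs.length : Int)) by ring,
          PySem.List.slice_natCast]
        simp
      · -- there is a content token
        have hw : xs.rdropWhile (fun x => x == b || x == e) ≠ [] := by
          intro hcon
          exact hall (List.rdropWhile_eq_nil_iff.mp hcon)
        have hx : xs.rdropWhile (fun x => x == b || x == e)
            ++ xs.rtakeWhile (fun x => x == b || x == e) = xs :=
          List.rdropWhile_append_rtakeWhile
        have ht : ∀ y ∈ xs.rtakeWhile (fun x => x == b || x == e), (y == b || y == e) = true :=
          fun y hy => List.mem_rtakeWhile_imp (p := fun x => x == b || x == e) hy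
        have hlastw : ((xs.rdropWhile (fun x => x == b || x == e)).getLast hw == b
            || (xs.rdropWhile (fun x => x == b || x == e)).getLast hw == e) = false := by
          have := List.rdropWhile_last_not (fun x => x == b || x == e) xs hw
          simpa using this
        have hwlen : 0 < (xs.rdropWhile (fun x => x == b || x == e)).length :=
          List.length_pos_iff.mpr hw
        have hlow : (xs.rdropWhile (fun x => x == b || x == e)).length ≤ xs.length :=
          (List.rdropWhile_prefix _ _).length_le
        have hgl : xs[(xs.rdropWhile (fun x => x == b || x == e)).length - 1]'(by omega)
            = (xs.rdropWhile (fun x => x == b || x == e)).getLast hw := by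
          conv_lhs => rw [List.getElem_of_eq hx.symm]
          rw [List.getElem_append_left (by omega), List.getLast_eq_getElem]
        have htle : (xs.takeWhile (fun x => x == b || x == e)).length
            ≤ (xs.rdropWhile (fun x => x == b || x == e)).length - 1 := by
          refine takeWhile_length_le b e xs
            ((xs.rdropWhile (fun x => x == b || x == e)).length - 1) (by omega) ?_
          rw [hgl]
          exact hlastw
        have hR : pvARight xs b e ((xs.takeWhile (fun x => x == b || x == e)).length : Int)
            ((xs.length : Int) - 1)
            = ((xs.rdropWhile (fun x => x == b || x == e)).length : Int) - 1 := by
          conv_lhs => rw [← hx]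
          rw [List.length_append]
          push_cast
          exact pvARight_spec b e _ (by positivity) _ _ hw ht hlastw (by rw [hx]; omega)
        rw [hR]
        have hkne : pvKeepers xs b e ≠ [] := by
          unfold pvKeepers
          intro hcon
          exact hall ((keepers_nil_iff b e xs 0).mp hcon)
        obtain ⟨k, ks, hk⟩ := List.exists_cons_of_ne_nil hkne
        rw [hk]
        dsimp only
        have hkh : k = ((xs.takeWhile (fun x => x == b || x == e)).length : Int) := by
          have := keepers_head b e xs 0 k ks (by rw [← hk]; rfl)
          omega
        have hkl : ks.getLastD k
            = ((xs.rdropWhile (fun x => x == b || x == e)).length : Int) - 1 := by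
          have := keepers_last b e 0 xs k ks (by rw [← hk]; rfl)
          omega
        rw [hkh] at hkl
        rw [hkh, hkl]
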